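-- pv_equiv track=rewrite | github.com/nitishgupta/nmn-drop | datasets/drop/preprocess/prune_date_comparison.py | getQuestionComparisonOperator
-- ===== SOURCE A (Python) =====
-- from typing import List, Dict, Tuple
--
-- FIRST="first"
--
-- SECOND="second"
--
-- def getQuestionComparisonOperator(question_tokens: List[str]) -> str:
--     # Correct if Attn1 is first event
--     lesser_tokens = ['first', 'earlier', 'forst', 'firts']
--     greater_tokens = ['later', 'last', 'second']
--
--     for t in lesser_tokens:
--         if t in question_tokens:
--             return FIRST
--
--     for t in greater_tokens:
--         if t in question_tokens:
--             return SECOND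
--
--     return SECOND
-- ===== SOURCE B (Python) =====
-- from typing import List
--
-- FIRST = "first"
-- SECOND = "second"
--
-- def getQuestionComparisonOperator(question_tokens: List[str]) -> str:
--     # Any greater-token hit yields SECOND, which is also the default,
--     # so only the lesser keywords matter: scan the question once.
--     lesser = {'first', 'earlier', 'forst', 'firts'}
--     for tok in question_tokens:
--         if tok in lesser:
--             return FIRST
--     return SECOND
-- ===== Notes on version B (the rewrite author's own statement) =====
-- stated objective: simpler
-- what changed: The greater-tokens loop can only return SECOND, which is the default, so B drops it and instead scans the question tokens once against a set of the four lesser keywords, returning FIRST on the first hit and SECOND otherwise.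
import Mathlib
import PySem

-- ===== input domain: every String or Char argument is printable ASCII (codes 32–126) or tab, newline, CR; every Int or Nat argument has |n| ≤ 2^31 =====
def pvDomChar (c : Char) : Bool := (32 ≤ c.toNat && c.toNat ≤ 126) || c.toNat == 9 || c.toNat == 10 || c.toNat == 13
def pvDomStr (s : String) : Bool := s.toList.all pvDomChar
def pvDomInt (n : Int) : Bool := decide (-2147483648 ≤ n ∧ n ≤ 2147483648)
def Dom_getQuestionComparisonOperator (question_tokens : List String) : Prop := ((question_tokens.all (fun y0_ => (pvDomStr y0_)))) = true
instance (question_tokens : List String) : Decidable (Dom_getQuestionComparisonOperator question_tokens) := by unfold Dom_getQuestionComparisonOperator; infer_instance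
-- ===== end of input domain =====

-- B drops A's dead greater-tokens loop and scans the question tokens once against a set of lesser keywords (simpler).


-- ===== PORT A =====
-- for t in lesser_tokens: if t in question_tokens: return FIRST; then the same over greater_tokens returning SECOND; default SECOND
def getQuestionComparisonOperator (question_tokens : List String) : String :=
  let lesser_tokens : List String := ["first", "earlier", "forst", "firts"]
  let greater_tokens : List String := ["later", "last", "second"]
  match lesser_tokens.find? (fun t => question_tokens.contains t) with
  | some _ => "first"
  | none =>
    match greater_tokens.find? (fun t => question_tokens.contains t) with
    | some _ => "second"
    | none => "second"

-- ===== PORT B =====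
-- one pass over question_tokens, membership in a set of the lesser keywords
def getQuestionComparisonOperator_alt (question_tokens : List String) : String :=
  let lesser : PySem.Set String := PySem.Set.ofList ["first", "earlier", "forst", "firts"]
  match question_tokens.find? (fun tok => PySem.Set.contains lesser tok) with
  | some _ => "first"
  | none => "second"

-- ===== PRECONDITION & SPEC =====
def Spec_getQuestionComparisonOperator (question_tokens : List String) (out : String) : Prop := out = getQuestionComparisonOperator_alt question_tokens
instance (question_tokens : List String) (out : String) : Decidable (Spec_getQuestionComparisonOperator question_tokens out) := by unfold Spec_getQuestionComparisonOperator; infer_instance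

-- ===== CLAIM (what is proved, stated in full; the proofs are below) =====
def Claim_equal_getQuestionComparisonOperator : Prop := ∀ (question_tokens : List String), Dom_getQuestionComparisonOperator question_tokens → Spec_getQuestionComparisonOperator question_tokens (getQuestionComparisonOperator question_tokens)

-- ===== LEMMAS AND PROOFS =====

-- A collapses to: FIRST iff the lesser-keyword scan hits, else SECOND (both later branches return SECOND).
theorem pv_A_eq (qs : List String) :
    getQuestionComparisonOperator qs =
      (if (List.find? (fun t => qs.contains t)
            (["first", "earlier", "forst", "firts"] : List String)).isSome
       then "first" else "second") := by
  unfold getQuestionComparisonOperator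
  dsimp only
  cases h : List.find? (fun t => qs.contains t)
      (["first", "earlier", "forst", "firts"] : List String) with
  | some v => simp
  | none =>
    cases hg : List.find? (fun t => qs.contains t)
        (["later", "last", "second"] : List String) <;> simp

-- B is: FIRST iff the question scan hits the lesser set, else SECOND.
theorem pv_B_eq (qs : List String) :
    getQuestionComparisonOperator_alt qs =
      (if (List.find? (fun tok =>
            PySem.Set.contains (PySem.Set.ofList ["first", "earlier", "forst", "firts"]) tok)
            qs).isSome
       then "first" else "second") := by
  unfold getQuestionComparisonOperator_alt
  dsimp only
  cases h : List.find? (fun tok =>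
      PySem.Set.contains (PySem.Set.ofList ["first", "earlier", "forst", "firts"]) tok) qs <;>
    simp

-- The two scans hit on exactly the same inputs: a common element exists.
theorem pv_find_iff (qs : List String) :
    ((["first", "earlier", "forst", "firts"] : List String).find?
        (fun t => qs.contains t)).isSome =
    (qs.find? (fun tok =>
        PySem.Set.contains (PySem.Set.ofList ["first", "earlier", "forst", "firts"]) tok)).isSome := by
  rw [Bool.eq_iff_iff]
  simp only [List.find?_isSome, PySem.Set.contains, PySem.Set.mem_ofList, List.mem_cons,
    List.not_mem_nil, decide_eq_true_eq, List.contains_eq_mem]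
  constructor
  · rintro ⟨t, ht, hq⟩
    exact ⟨t, by simpa using hq, by simpa using ht⟩
  · rintro ⟨t, hq, ht⟩
    exact ⟨t, by simpa using ht, by simpa using hq⟩

-- ===== VERDICT (by name: the statement is the Claim_ definition above) =====
theorem getQuestionComparisonOperator_spec : Claim_equal_getQuestionComparisonOperator := by
  intro qs _
  unfold Spec_getQuestionComparisonOperator
  rw [pv_A_eq, pv_B_eq, pv_find_iff]
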